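-- pv_equiv track=rewrite | github.com/xiaoshuai155vv/friday | scripts/evolution_deep_integration.py | _determine_recommended_focus
-- ===== SOURCE A (Python) =====
-- from typing import Any, Dict, List, Optional
--
-- def _determine_recommended_focus(
--
--     suggestions: List[Dict],
--     predictions: Dict
-- ) -> str:
--     """确定推荐的进化焦点"""
--     if not suggestions:
--         return "系统已处于良好状态，可探索创新方向"
--
--     # 优先处理高优先级建议
--     high_priority = [s for s in suggestions if s.get("priority") == "high"]
--
--     if high_priority:
--         return f"建议优先处理: {high_priority[0].get('description', '未知')}"
--
--     # 按类型排序
--     type_priority = {"integration": 1, "efficiency": 2, "diversity": 3, "knowledge": 4}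
--     sorted_suggestions = sorted(
--         suggestions,
--         key=lambda x: type_priority.get(x.get("type", ""), 99)
--     )
--
--     if sorted_suggestions:
--         return f"建议关注: {sorted_suggestions[0].get('description', '未知')}"
--
--     return "继续当前进化方向"
-- ===== SOURCE B (Python) =====
-- from typing import Any, Dict, List, Optional
--
-- _TYPE_PRIORITY = {"integration": 1, "efficiency": 2, "diversity": 3, "knowledge": 4}
--
-- def _determine_recommended_focus(suggestions: List[Dict], predictions: Dict) -> str:
--     if not suggestions:
--         return "系统已处于良好状态，可探索创新方向"
--     first_high = None
--     best = suggestions[0]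
--     for s in suggestions:
--         if first_high is None and s.get("priority") == "high":
--             first_high = s
--         if _TYPE_PRIORITY.get(s.get("type", ""), 99) < _TYPE_PRIORITY.get(best.get("type", ""), 99):
--             best = s
--     if first_high is not None:
--         return f"建议优先处理: {first_high.get('description', '未知')}"
--     return f"建议关注: {best.get('description', '未知')}"
-- ===== Notes on version B (the rewrite author's own statement) =====
-- stated objective: alternative
-- what changed: Replaced A's filter-pass plus full stable sort with a single loop keeping two accumulators (first high-priority element, and the first element of minimal type priority via strict-improvement updates), eliminating the sort and the unreachable fallback branch.
import Mathlib
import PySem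

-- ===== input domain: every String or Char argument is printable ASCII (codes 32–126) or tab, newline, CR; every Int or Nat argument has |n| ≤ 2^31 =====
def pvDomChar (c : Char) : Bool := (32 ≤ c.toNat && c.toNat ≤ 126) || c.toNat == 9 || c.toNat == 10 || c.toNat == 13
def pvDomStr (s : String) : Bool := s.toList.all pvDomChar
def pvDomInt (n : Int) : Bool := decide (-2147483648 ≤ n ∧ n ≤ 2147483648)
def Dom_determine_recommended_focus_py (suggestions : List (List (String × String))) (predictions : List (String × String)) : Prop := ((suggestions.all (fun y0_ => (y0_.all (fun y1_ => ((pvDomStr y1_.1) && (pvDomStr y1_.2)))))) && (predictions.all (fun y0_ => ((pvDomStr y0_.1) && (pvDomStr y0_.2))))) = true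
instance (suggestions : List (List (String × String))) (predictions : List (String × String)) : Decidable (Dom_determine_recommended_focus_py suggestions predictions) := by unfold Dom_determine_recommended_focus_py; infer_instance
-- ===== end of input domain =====

-- B replaces A's filter pass + stable sort by one fold keeping the first high-priority element
-- and the first element of minimal type priority (alternative decomposition; same results).

-- ===== PORT A =====
-- d.get(k, dflt) on an association list (first match), as both Pythons use it
def pvDget (d : List (String × String)) (k dflt : String) : String :=
  match d.find? (fun p => p.1 == k) with
  | some p => p.2
  | none => dflt

-- d.get(k) (no default): None → none
def pvDget? (d : List (String × String)) (k : String) : Option String :=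
  (d.find? (fun p => p.1 == k)).map (·.2)

-- s.get("priority") == "high" (None never equals "high")
def pvIsHigh (s : List (String × String)) : Bool := pvDget? s "priority" == some "high"

-- the literal dict type_priority
def pvTypePriority : PySem.Dict String Int :=
  PySem.Dict.ofList [("integration", 1), ("efficiency", 2), ("diversity", 3), ("knowledge", 4)]

-- the sort key lambda: type_priority.get(x.get("type", ""), 99)
def pvKey (x : List (String × String)) : Int := pvTypePriority.getD (pvDget x "type" "") 99

def determine_recommended_focus_py (suggestions : List (List (String × String))) (predictions : List (String × String)) : String :=
  if suggestions = [] then "系统已处于良好状态，可探索创新方向"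
  else
    let high_priority := suggestions.filter (fun s => pvIsHigh s)
    match high_priority with
    | h :: _ => "建议优先处理: " ++ pvDget h "description" "未知"
    | [] =>
      let sorted_suggestions := PySem.List.sorted suggestions pvKey false
      match sorted_suggestions with
      | h :: _ => "建议关注: " ++ pvDget h "description" "未知"
      | [] => "继续当前进化方向"

-- ===== PORT B =====
def determine_recommended_focus_py_alt (suggestions : List (List (String × String))) (predictions : List (String × String)) : String :=
  match suggestions with
  | [] => "系统已处于良好状态，可探索创新方向"
  | s0 :: _ =>
    let st := suggestions.foldl
      (fun (acc : Option (List (String × String)) × List (String × String)) s =>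
        ((match acc.1 with
          | some a => some a
          | none => if pvIsHigh s then some s else none),
         if pvKey s < pvKey acc.2 then s else acc.2))
      (none, s0)
    match st.1 with
    | some h => "建议优先处理: " ++ pvDget h "description" "未知"
    | none => "建议关注: " ++ pvDget st.2 "description" "未知"

-- ===== PRECONDITION & SPEC =====
def Spec_determine_recommended_focus_py (suggestions : List (List (String × String))) (predictions : List (String × String)) (out : String) : Prop := out = determine_recommended_focus_py_alt suggestions predictions
instance (suggestions : List (List (String × String))) (predictions : List (String × String)) (out : String) : Decidable (Spec_determine_recommended_focus_py suggestions predictions out) := by unfold Spec_determine_recommended_focus_py; infer_instance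

-- ===== CLAIM (what is proved, stated in full; the proofs are below) =====
def Claim_equal_determine_recommended_focus_py : Prop := ∀ (suggestions : List (List (String × String))) (predictions : List (String × String)), Dom_determine_recommended_focus_py suggestions predictions → Spec_determine_recommended_focus_py suggestions predictions (determine_recommended_focus_py suggestions predictions)

-- ===== LEMMAS AND PROOFS =====

-- B's fold over the pair splits into two independent folds
lemma pv_fold_split :
    ∀ (xs : List (List (String × String))) (o : Option (List (String × String))) (b : List (String × String)),
      xs.foldl (fun (acc : Option (List (String × String)) × List (String × String)) s =>
        ((match acc.1 with
          | some a => some a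
          | none => if pvIsHigh s then some s else none),
         if pvKey s < pvKey acc.2 then s else acc.2)) (o, b)
      = (xs.foldl (fun o s => match o with
          | some a => some a
          | none => if pvIsHigh s then some s else none) o,
         xs.foldl (fun b s => if pvKey s < pvKey b then s else b) b) := by
  intro xs
  induction xs with
  | nil => intro o b; rfl
  | cons x t ih =>
    intro o b
    rw [List.foldl_cons, List.foldl_cons, List.foldl_cons]
    exact ih _ _

-- the "first match" accumulator computes the head of the filtered list
lemma pv_foldl_first :
    ∀ (xs : List (List (String × String))),
      xs.foldl (fun o s => match o with
        | some a => some a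
        | none => if pvIsHigh s then some s else none)
        (none : Option (List (String × String)))
      = (xs.filter (fun s => pvIsHigh s)).head? := by
  have hkeep : ∀ (xs : List (List (String × String))) (a : List (String × String)),
      xs.foldl (fun o s => match o with
        | some a => some a
        | none => if pvIsHigh s then some s else none) (some a) = some a := by
    intro xs
    induction xs with
    | nil => intro a; rfl
    | cons x t ih => intro a; simpa using ih a
  intro xs
  induction xs with
  | nil => rfl
  | cons x t ih =>
    by_cases h : (pvIsHigh x) = true
    · simp [List.foldl, h, hkeep]
    · simp [List.foldl, h, ih]

-- head of the stable insertion sort's fold is the strict-min fold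
lemma pv_headI_insertBy {α : Type} [Inhabited α] (key : α → Int) :
    ∀ (xs : List α) (acc : List α), acc ≠ [] →
      (xs.foldl (fun a x => PySem.List.insertBy (fun a b => decide (key a < key b)) x a) acc).headI
      = xs.foldl (fun b x => if key x < key b then x else b) acc.headI := by
  intro xs
  induction xs with
  | nil => intro acc _; rfl
  | cons x t ih =>
    intro acc hne
    obtain ⟨a, tl, rfl⟩ := List.exists_cons_of_ne_nil hne
    have hne' : PySem.List.insertBy (fun a b => decide (key a < key b)) x (a :: tl) ≠ [] := by
      intro h
      have : x ∈ PySem.List.insertBy (fun a b => decide (key a < key b)) x (a :: tl) :=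
        (PySem.List.mem_insertBy _ _ _ _).2 (Or.inl rfl)
      simp [h] at this
    have hh : (PySem.List.insertBy (fun a b => decide (key a < key b)) x (a :: tl)).headI
        = if key x < key a then x else a := by
      by_cases h : key x < key a
      · simp [PySem.List.insertBy, h]
      · simp [PySem.List.insertBy, h]
    rw [List.foldl_cons, ih _ hne', hh]
    simp [List.foldl]

-- ===== VERDICT (by name: the statement is the Claim_ definition above) =====
theorem determine_recommended_focus_py_spec : Claim_equal_determine_recommended_focus_py := by
  intro suggestions predictions _
  unfold Spec_determine_recommended_focus_py
  unfold determine_recommended_focus_py determine_recommended_focus_py_alt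
  cases suggestions with
  | nil => rfl
  | cons s0 rest =>
    simp only [if_neg (List.cons_ne_nil s0 rest)]
    rw [pv_fold_split, pv_foldl_first]
    cases hfil : (s0 :: rest).filter (fun s => pvIsHigh s) with
    | cons a b => simp
    | nil =>
      simp only [List.head?_nil]
      have hsne : PySem.List.sorted (s0 :: rest) pvKey false ≠ [] := by
        simp [PySem.List.sorted_eq_nil_iff]
      obtain ⟨m, tl, hm⟩ := List.exists_cons_of_ne_nil hsne
      have hhead : m = (s0 :: rest).foldl (fun b x => if pvKey x < pvKey b then x else b) s0 := by
        have h1 : (PySem.List.sorted (s0 :: rest) pvKey false).headI = m := by rw [hm]; rfl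
        rw [PySem.List.sorted_eq_foldl_insertBy] at h1
        have h2 : ((s0 :: rest).foldl
            (fun a x => PySem.List.insertBy (fun a b => decide (pvKey a < pvKey b)) x a)
            []) = (rest.foldl
            (fun a x => PySem.List.insertBy (fun a b => decide (pvKey a < pvKey b)) x a)
            [s0]) := by
          rw [List.foldl_cons]
          congr 1
        rw [h2, pv_headI_insertBy pvKey rest [s0] (by simp)] at h1
        rw [← h1]
        simp [List.foldl]
      rw [hm]
      simp [hhead]
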